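-- pv_equiv track=rewrite | github.com/MINDLAB1/SACE | SCA_pretraining/datasets/dataset_pretext.py | select_nth_fifth_images_for_validation
-- ===== SOURCE A (Python) =====
-- def select_nth_fifth_images_for_validation(image_list, n):
--     if n < 1 or n > 5:
--         raise ValueError("n must be between 1 and 5")
--     unique_3d_images = set('_'.join(image.split('_')[:-1]) for image in image_list)
--     sorted_unique_3d_images = sorted(unique_3d_images)
--     fifth = len(sorted_unique_3d_images) // 5
--     start_index = (n - 1) * fifth
--     end_index = start_index + fifth if n < 5 else len(sorted_unique_3d_images)
--     selected_images = set(sorted_unique_3d_images[start_index:end_index])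
--     remaining_images = set()
--     for i in range(1, 6):
--         if i != n:
--             start = (i - 1) * fifth
--             end = start + fifth if i < 5 else len(sorted_unique_3d_images)
--             remaining_images.update(sorted_unique_3d_images[start:end])
--     selected_filtered_images = [image for image in image_list if '_'.join(image.split('_')[:-1]) in selected_images]
--     remaining_filtered_images = [image for image in image_list if '_'.join(image.split('_')[:-1]) in remaining_images]
--
--     return selected_filtered_images, remaining_filtered_images
-- ===== SOURCE B (Python) =====
-- def _prefix(image):
--     return '_'.join(image.split('_')[:-1])
--
--
-- def select_nth_fifth_images_for_validation(image_list, n):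
--     if n < 1 or n > 5:
--         raise ValueError("n must be between 1 and 5")
--     # no sorting, no slicing: classify each prefix by its RANK (number of distinct
--     # prefixes strictly smaller), mapping ranks to fifths arithmetically
--     prefixes = set(_prefix(image) for image in image_list)
--     fifth = len(prefixes) // 5
--
--     def bucket(prefix):
--         rank = sum(1 for q in prefixes if q < prefix)
--         if fifth == 0 or rank >= 4 * fifth:
--             return 5
--         return rank // fifth + 1
--
--     selected, remaining = [], []
--     for image in image_list:
--         (selected if bucket(_prefix(image)) == n else remaining).append(image)
--     return selected, remaining
-- ===== Notes on version B (the rewrite author's own statement) =====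
-- stated objective: alternative
-- what changed: B eliminates A's sort-and-slice machinery entirely: instead of sorting the unique prefixes and slicing out the nth fifth plus a 5-iteration union of the other slices, B computes each prefix's rank (count of distinct prefixes strictly smaller) and maps the rank to its fifth arithmetically (rank // fifth + 1, capped at 5), routing each image in one pass by whether its bucket equals n.
import Mathlib
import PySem

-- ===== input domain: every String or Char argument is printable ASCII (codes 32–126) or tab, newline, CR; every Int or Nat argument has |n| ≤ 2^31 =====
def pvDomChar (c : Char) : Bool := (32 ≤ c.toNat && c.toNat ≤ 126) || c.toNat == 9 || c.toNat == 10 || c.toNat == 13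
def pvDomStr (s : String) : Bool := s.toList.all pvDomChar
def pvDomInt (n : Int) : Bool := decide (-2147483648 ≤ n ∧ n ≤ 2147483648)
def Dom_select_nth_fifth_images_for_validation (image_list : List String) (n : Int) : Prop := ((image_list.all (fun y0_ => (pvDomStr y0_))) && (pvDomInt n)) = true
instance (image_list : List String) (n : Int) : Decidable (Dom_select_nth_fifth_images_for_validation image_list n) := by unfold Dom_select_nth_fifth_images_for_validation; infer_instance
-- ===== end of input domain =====

-- B replaces A's sort-slice-and-union machinery by rank arithmetic: each prefix's rank
-- (count of strictly smaller distinct prefixes) is mapped to its fifth by rank // fifth,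
-- and one pass routes the images; objective: alternative (no sort, no slices, same result).

-- shared helper: '_'.join(image.split('_')[:-1])
def pvPrefix (image : String) : String :=
  PySem.Str.join "_" (PySem.List.slice ((PySem.Str.split? image "_").getD []) none (some (-1)))

-- ===== PORT A =====
def select_nth_fifth_images_for_validation (image_list : List String) (n : Int) : List String × List String :=
  -- 'if n < 1 or n > 5: raise ValueError' is excluded by Pre_
  let unique_3d_images : PySem.Set String := PySem.Set.ofList (image_list.map pvPrefix)
  let sorted_unique_3d_images := PySem.List.sorted unique_3d_images (fun x => x) false
  let fifth := PySem.Int.floordiv (sorted_unique_3d_images.length : Int) 5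
  let start_index := (n - 1) * fifth
  let end_index := if n < 5 then start_index + fifth else (sorted_unique_3d_images.length : Int)
  let selected_images : PySem.Set String :=
    PySem.Set.ofList (PySem.List.slice sorted_unique_3d_images (some start_index) (some end_index))
  let remaining_images : PySem.Set String :=
    (PySem.List.pyRange 1 6 1).foldl (fun acc i =>
      if i ≠ n then
        PySem.Set.update acc (PySem.List.slice sorted_unique_3d_images (some ((i - 1) * fifth))
          (some (if i < 5 then (i - 1) * fifth + fifth else (sorted_unique_3d_images.length : Int))))
      else acc) PySem.Set.empty
  let selected_filtered_images := image_list.filter (fun image => PySem.Set.contains selected_images (pvPrefix image))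
  let remaining_filtered_images := image_list.filter (fun image => PySem.Set.contains remaining_images (pvPrefix image))
  (selected_filtered_images, remaining_filtered_images)

-- ===== PORT B =====
-- B's bucket helper: rank = sum(1 for q in prefixes if q < p); 5 if fifth == 0 or
-- rank >= 4*fifth, else rank // fifth + 1
def pvBucket (prefixes : PySem.Set String) (fifth : Int) (p : String) : Int :=
  let rank : Int := ((prefixes.countP (fun q => decide (q < p)) : Nat) : Int)
  if fifth = 0 ∨ 4 * fifth ≤ rank then 5 else PySem.Int.floordiv rank fifth + 1

def select_nth_fifth_images_for_validation_alt (image_list : List String) (n : Int) : List String × List String :=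
  -- 'if n < 1 or n > 5: raise ValueError' is excluded by Pre_
  let prefixes : PySem.Set String := PySem.Set.ofList (image_list.map pvPrefix)
  let fifth := PySem.Int.floordiv (prefixes.length : Int) 5
  -- single pass: route each image by whether its prefix's bucket is n
  image_list.foldl (fun acc image =>
      if pvBucket prefixes fifth (pvPrefix image) = n then (acc.1 ++ [image], acc.2)
      else (acc.1, acc.2 ++ [image])) ([], [])

-- ===== PRECONDITION & SPEC =====
-- Pre_ excludes exactly the inputs where A raises ValueError (n < 1 or n > 5); B raises there too.
def Pre_select_nth_fifth_images_for_validation (image_list : List String) (n : Int) : Prop := 1 ≤ n ∧ n ≤ 5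
instance (image_list : List String) (n : Int) : Decidable (Pre_select_nth_fifth_images_for_validation image_list n) := by unfold Pre_select_nth_fifth_images_for_validation; infer_instance
def pvWitness_select_nth_fifth_images_for_validation : List String × Int := (["a_1", "a_2", "b_1", "c_1", "d_1", "e_1", "f_1"], 2)
def Spec_select_nth_fifth_images_for_validation (image_list : List String) (n : Int) (out : List String × List String) : Prop := out = select_nth_fifth_images_for_validation_alt image_list n
instance (image_list : List String) (n : Int) (out : List String × List String) : Decidable (Spec_select_nth_fifth_images_for_validation image_list n out) := by unfold Spec_select_nth_fifth_images_for_validation; infer_instance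

-- ===== CLAIM (what is proved, stated in full; the proofs are below) =====
def Claim_equal_select_nth_fifth_images_for_validation : Prop := ∀ (image_list : List String) (n : Int), Dom_select_nth_fifth_images_for_validation image_list n → Pre_select_nth_fifth_images_for_validation image_list n → Spec_select_nth_fifth_images_for_validation image_list n (select_nth_fifth_images_for_validation image_list n)

-- ===== LEMMAS AND PROOFS =====

-- B's routing loop is two filters of image_list, run in one pass
theorem pv_foldl_route (p : String → Prop) [DecidablePred p] (l : List String) (a b : List String) :
    l.foldl (fun acc x => if p x then (acc.1 ++ [x], acc.2) else (acc.1, acc.2 ++ [x])) (a, b)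
      = (a ++ l.filter (fun x => decide (p x)), b ++ l.filter (fun x => !decide (p x))) := by
  induction l generalizing a b with
  | nil => simp
  | cons x xs ih =>
    by_cases h : p x <;> simp [List.foldl_cons, h, ih]

theorem pv_mem_foldl_update (p : Int → Prop) [DecidablePred p] (S : Int → List String)
    (l : List Int) (acc : PySem.Set String) (x : String) :
    (x ∈ l.foldl (fun a i => if p i then PySem.Set.update a (S i) else a) acc)
      ↔ (x ∈ acc ∨ ∃ i ∈ l, p i ∧ x ∈ S i) := by
  induction l generalizing acc with
  | nil => simp
  | cons i is ih =>
    by_cases h : p i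
    · simp [h, ih, PySem.Set.mem_update, or_assoc]
    · simp [h, ih]

theorem pv_mem_mid {u v w : List String} {x : String}
    (hnd : (u ++ v ++ w).Nodup) (hx : x ∈ u ++ v ++ w) :
    (x ∈ v ↔ ¬ (x ∈ u ∨ x ∈ w)) := by
  simp only [List.nodup_append, List.mem_append] at hnd hx
  constructor
  · intro hxv hc
    rcases hc with h | h
    · exact hnd.1.2.2 x h x hxv rfl
    · exact hnd.2.2 x (Or.inr hxv) x h rfl
  · intro hne
    rcases hx with (h | h) | h
    · exact absurd (Or.inl h) hne
    · exact h
    · exact absurd (Or.inr h) hne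

set_option maxHeartbeats 2000000 in
theorem pv_key (s : List String) (hnd : s.Nodup) (f : Nat) (n : Int) (h1 : 1 ≤ n) (h5 : n ≤ 5)
    (x : String) (hx : x ∈ s) :
    (x ∈ List.foldl (fun acc i =>
        if i ≠ n then
          PySem.Set.update acc (PySem.List.slice s (some ((i - 1) * (f : Int)))
            (some (if i < 5 then (i - 1) * (f : Int) + (f : Int) else (s.length : Int))))
        else acc) PySem.Set.empty (PySem.List.pyRange 1 6 1))
      ↔ ¬ x ∈ PySem.Set.ofList (PySem.List.slice s (some ((n - 1) * (f : Int)))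
            (some (if n < 5 then (n - 1) * (f : Int) + (f : Int) else (s.length : Int)))) := by
  rw [pv_mem_foldl_update (p := fun i => i ≠ n)
      (S := fun i => PySem.List.slice s (some ((i - 1) * (f : Int)))
        (some (if i < 5 then (i - 1) * (f : Int) + (f : Int) else (s.length : Int))))]
  rw [show PySem.List.pyRange 1 6 1 = [1, 2, 3, 4, 5] from by decide]
  rw [PySem.Set.mem_ofList]
  -- slice characterizations
  have g4 : ∀ j : Nat, PySem.List.slice s (some ((j : Int) * (f : Int))) (some ((j : Int) * (f : Int) + (f : Int)))
      = (s.drop (j * f)).take f := by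
    intro j
    rw [show ((j : Int) * (f : Int)) = ((j * f : Nat) : Int) by push_cast; ring]
    exact PySem.List.slice_natCast_add ..
  have g5 : PySem.List.slice s (some ((4 : Int) * (f : Int))) (some (s.length : Int)) = s.drop (4 * f) := by
    rw [show ((4 : Int) * (f : Int)) = ((4 * f : Nat) : Int) by push_cast; ring]
    rw [PySem.List.slice_natCast]
    exact List.take_of_length_le (by simp)
  have hdd : ∀ a : Nat, s.drop a = (s.drop a).take f ++ s.drop (a + f) := by
    intro a
    conv_lhs => rw [← List.take_append_drop f (s.drop a)]
    rw [List.drop_drop]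
  have hD : ∀ j : Nat, (x ∈ s.drop (j*f) ↔ x ∈ (s.drop (j*f)).take f ∨ x ∈ s.drop ((j+1)*f)) := by
    intro j
    rw [show ((j+1)*f) = j*f + f from by ring]
    conv_lhs => rw [hdd (j*f)]
    exact List.mem_append
  have hT : ∀ j : Nat, (x ∈ s.take ((j+1)*f) ↔ x ∈ s.take (j*f) ∨ x ∈ (s.drop (j*f)).take f) := by
    intro j
    rw [show ((j+1)*f) = j*f + f from by ring, List.take_add, List.mem_append]
  have hM : ∀ j : Nat, (x ∈ (s.drop (j*f)).take f ↔ ¬ (x ∈ s.take (j*f) ∨ x ∈ s.drop ((j+1)*f))) := by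
    intro j
    rw [show ((j+1)*f) = j*f + f from by ring]
    have hsEq : s.take (j*f) ++ (s.drop (j*f)).take f ++ s.drop (j*f + f) = s := by
      rw [List.append_assoc, ← hdd (j*f), List.take_append_drop]
    exact pv_mem_mid (by rw [hsEq]; exact hnd) (by rw [hsEq]; exact hx)
  have hM4 : (x ∈ s.drop (4*f) ↔ ¬ (x ∈ s.take (4*f) ∨ x ∈ ([] : List String))) := by
    have hsEq : s.take (4*f) ++ s.drop (4*f) ++ [] = s := by
      rw [List.append_nil, List.take_append_drop]
    exact pv_mem_mid (by rw [hsEq]; exact hnd) (by rw [hsEq]; exact hx)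
  have h0 : x ∈ s.drop (0*f) := by simpa using hx
  have hT0 : ¬ x ∈ s.take (0*f) := by simp
  have s1 : PySem.List.slice s (some (f : Int)) (some ((f : Int) + (f : Int))) = (s.drop f).take f := by
    have := g4 1; norm_num at this; exact this
  have s2 : PySem.List.slice s (some (2 * (f : Int))) (some (2 * (f : Int) + (f : Int))) = (s.drop (2 * f)).take f := by
    have := g4 2; norm_num at this; exact this
  have s3 : PySem.List.slice s (some (3 * (f : Int))) (some (3 * (f : Int) + (f : Int))) = (s.drop (3 * f)).take f := by
    have := g4 3; norm_num at this; exact this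
  interval_cases n
  · simp only [List.mem_cons, List.not_mem_nil, or_false, exists_eq_or_imp, exists_eq_left]
    norm_num
    simp only [s1, s2, s3, g5]
    have m0 := hM 0; have b0 := hD 0; have b1 := hD 1; have b2 := hD 2; have b3 := hD 3
    norm_num at m0 b0 b1 b2 b3
    clear hnd g4 g5 hdd hD hT hM hM4 h0 hT0 s1 s2 s3
    tauto
  · simp only [List.mem_cons, List.not_mem_nil, or_false, exists_eq_or_imp, exists_eq_left]
    norm_num
    simp only [s1, s2, s3, g5]
    have m1 := hM 1; have b2 := hD 2; have b3 := hD 3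
    norm_num at m1 b2 b3
    clear hx hnd g4 g5 hdd hD hT hM hM4 h0 hT0 s1 s2 s3
    tauto
  · simp only [List.mem_cons, List.not_mem_nil, or_false, exists_eq_or_imp, exists_eq_left]
    norm_num
    simp only [s1, s2, s3, g5]
    have m2 := hM 2; have c1 := hT 1; have b3 := hD 3
    norm_num at m2 c1 b3
    clear hx hnd g4 g5 hdd hD hT hM hM4 h0 hT0 s1 s2 s3
    tauto
  · simp only [List.mem_cons, List.not_mem_nil, or_false, exists_eq_or_imp, exists_eq_left]
    norm_num
    simp only [s1, s2, s3, g5]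
    have m3 := hM 3; have c1 := hT 1; have c2 := hT 2
    norm_num at m3 c1 c2
    clear hx hnd g4 g5 hdd hD hT hM hM4 h0 hT0 s1 s2 s3
    tauto
  · simp only [List.mem_cons, List.not_mem_nil, or_false, exists_eq_or_imp, exists_eq_left]
    norm_num
    simp only [s1, s2, s3, g5]
    have d4 := hM4; have c1 := hT 1; have c2 := hT 2; have c3 := hT 3
    norm_num at d4 c1 c2 c3
    clear hx hnd g4 g5 hdd hD hT hM hM4 h0 hT0 s1 s2 s3
    tauto

-- the rank of x in a strictly sorted list names its position
theorem pv_rank (s : List String) (hp : s.Pairwise (· < ·)) (x : String) (hx : x ∈ s) :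
    s.countP (fun q => decide (q < x)) < s.length ∧
    s[s.countP (fun q => decide (q < x))]? = some x := by
  induction s with
  | nil => simp at hx
  | cons y t ih =>
    rw [List.pairwise_cons] at hp
    rcases List.mem_cons.mp hx with rfl | hxt
    · have h0 : t.countP (fun q => decide (q < x)) = 0 := by
        rw [List.countP_eq_zero]
        intro q hq
        simp [asymm (hp.1 q hq)]
      have hyy : (decide (x < x)) = false := by simp
      rw [List.countP_cons, h0, hyy]
      simp
    · have hy : y < x := hp.1 x hxt
      obtain ⟨ih1, ih2⟩ := ih hp.2 hxt
      rw [List.countP_cons]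
      simp only [hy, decide_true, if_pos]
      constructor
      · simpa using Nat.succ_lt_succ ih1
      · simpa using ih2

theorem pv_mem_take (s : List String) (hnd : s.Nodup) (x : String) (r : Nat)
    (hr : r < s.length) (hsr : s[r]? = some x) (b : Nat) :
    x ∈ s.take b ↔ r < b := by
  rw [List.getElem?_eq_some_iff] at hsr
  obtain ⟨_, hsr⟩ := hsr
  rw [List.mem_take_iff_getElem]
  constructor
  · rintro ⟨m, hm, hmx⟩
    have : m = r := (List.Nodup.getElem_inj_iff hnd (hi := by omega) (hj := hr)).mp
      (by rw [hmx, hsr])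
    omega
  · intro hb
    exact ⟨r, by omega, hsr⟩

theorem pv_mem_drop (s : List String) (hnd : s.Nodup) (x : String) (r : Nat)
    (hr : r < s.length) (hsr : s[r]? = some x) (a : Nat) :
    x ∈ s.drop a ↔ a ≤ r := by
  have hx : x ∈ s := List.mem_of_getElem? hsr
  have hsplit : x ∈ s.take a ∨ x ∈ s.drop a := by
    rw [← List.mem_append, List.take_append_drop]; exact hx
  have hdisj : ¬ (x ∈ s.take a ∧ x ∈ s.drop a) := by
    rintro ⟨hm1, hm2⟩
    exact (List.nodup_append.mp (by rw [List.take_append_drop]; exact hnd)).2.2 x hm1 x hm2 rfl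
  rw [pv_mem_take s hnd x r hr hsr a] at hsplit hdisj
  constructor
  · intro h
    by_contra hc
    exact hdisj ⟨by omega, h⟩
  · intro h
    rcases hsplit with h' | h'
    · omega
    · exact h'

theorem pv_mem_drop_take (s : List String) (hnd : s.Nodup) (x : String) (r : Nat)
    (hr : r < s.length) (hsr : s[r]? = some x) (a k : Nat) :
    x ∈ (s.drop a).take k ↔ a ≤ r ∧ r < a + k := by
  constructor
  · intro h
    have hm1 : x ∈ s.drop a := List.take_subset k _ h
    have hm2 : x ∈ s.take (a + k) := by
      rw [List.take_add, List.mem_append]; exact Or.inr h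
    exact ⟨(pv_mem_drop s hnd x r hr hsr a).mp hm1,
      (pv_mem_take s hnd x r hr hsr (a + k)).mp hm2⟩
  · rintro ⟨ha, hk⟩
    have hm2 : x ∈ s.take (a + k) := (pv_mem_take s hnd x r hr hsr (a + k)).mpr hk
    rw [List.take_add, List.mem_append] at hm2
    rcases hm2 with hm2 | hm2
    · have := (pv_mem_take s hnd x r hr hsr a).mp hm2; omega
    · exact hm2

theorem pv_div_eq (r f k : Nat) (hf : 0 < f) : r / f = k ↔ k * f ≤ r ∧ r < k * f + f := by
  rw [Nat.div_eq_iff hf]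
  omega

-- membership in A's selected slice ↔ B's bucket of the rank is n
theorem pv_sel (s : List String) (hp : s.Pairwise (· < ·)) (f : Nat) (n : Int)
    (h1 : 1 ≤ n) (h5 : n ≤ 5) (x : String) (hx : x ∈ s) :
    (x ∈ PySem.Set.ofList (PySem.List.slice s (some ((n - 1) * (f : Int)))
        (some (if n < 5 then (n - 1) * (f : Int) + (f : Int) else (s.length : Int)))))
      ↔ (if (f : Int) = 0 ∨ 4 * (f : Int) ≤ ((s.countP (fun q => decide (q < x)) : Nat) : Int)
          then (5 : Int)
          else PySem.Int.floordiv ((s.countP (fun q => decide (q < x)) : Nat) : Int) (f : Int) + 1) = n := by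
  have hnd : s.Nodup := hp.imp (fun h => ne_of_lt h)
  obtain ⟨hr, hsr⟩ := pv_rank s hp x hx
  set r := s.countP (fun q => decide (q < x)) with hrdef
  rw [PySem.Set.mem_ofList]
  have hfd : PySem.Int.floordiv ((r : Nat) : Int) ((f : Nat) : Int) = ((r / f : Nat) : Int) :=
    PySem.Int.floordiv_natCast r f
  interval_cases n
  · -- n = 1
    rw [show ((1:Int) - 1) * (f:Int) = ((0*f : Nat) : Int) by push_cast; ring,
        if_pos (show (1:Int) < 5 by norm_num),
        PySem.List.slice_natCast_add,
        pv_mem_drop_take s hnd x r hr hsr (0*f) f]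
    by_cases hf : f = 0
    · subst hf
      rw [if_pos (Or.inl (by norm_num))]
      constructor
      · intro h; omega
      · intro h; norm_num at h
    · by_cases hc : 4*f ≤ r
      · rw [if_pos (Or.inr (by omega))]
        constructor
        · intro h; omega
        · intro h; norm_num at h
      · rw [if_neg (by omega), hfd]
        constructor
        · intro h
          have hq : r / f = 0 := (pv_div_eq r f 0 (by omega)).mpr (by omega)
          rw [hq]; norm_num
        · intro h
          have hq : r / f = 0 := by exact_mod_cast (show ((r/f : Nat) : Int) = 0 by omega)
          have := (pv_div_eq r f 0 (by omega)).mp hq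
          omega
  · -- n = 2
    rw [show ((2:Int) - 1) * (f:Int) = ((1*f : Nat) : Int) by push_cast; ring,
        if_pos (show (2:Int) < 5 by norm_num),
        PySem.List.slice_natCast_add,
        pv_mem_drop_take s hnd x r hr hsr (1*f) f]
    by_cases hf : f = 0
    · subst hf
      rw [if_pos (Or.inl (by norm_num))]
      constructor
      · intro h; omega
      · intro h; norm_num at h
    · by_cases hc : 4*f ≤ r
      · rw [if_pos (Or.inr (by omega))]
        constructor
        · intro h; omega
        · intro h; norm_num at h
      · rw [if_neg (by omega), hfd]
        constructor
        · intro h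
          have hq : r / f = 1 := (pv_div_eq r f 1 (by omega)).mpr (by omega)
          rw [hq]; norm_num
        · intro h
          have hq : r / f = 1 := by exact_mod_cast (show ((r/f : Nat) : Int) = 1 by omega)
          have := (pv_div_eq r f 1 (by omega)).mp hq
          omega
  · -- n = 3
    rw [show ((3:Int) - 1) * (f:Int) = ((2*f : Nat) : Int) by push_cast; ring,
        if_pos (show (3:Int) < 5 by norm_num),
        PySem.List.slice_natCast_add,
        pv_mem_drop_take s hnd x r hr hsr (2*f) f]
    by_cases hf : f = 0
    · subst hf
      rw [if_pos (Or.inl (by norm_num))]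
      constructor
      · intro h; omega
      · intro h; norm_num at h
    · by_cases hc : 4*f ≤ r
      · rw [if_pos (Or.inr (by omega))]
        constructor
        · intro h; omega
        · intro h; norm_num at h
      · rw [if_neg (by omega), hfd]
        constructor
        · intro h
          have hq : r / f = 2 := (pv_div_eq r f 2 (by omega)).mpr (by omega)
          rw [hq]; norm_num
        · intro h
          have hq : r / f = 2 := by exact_mod_cast (show ((r/f : Nat) : Int) = 2 by omega)
          have := (pv_div_eq r f 2 (by omega)).mp hq
          omega
  · -- n = 4
    rw [show ((4:Int) - 1) * (f:Int) = ((3*f : Nat) : Int) by push_cast; ring,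
        if_pos (show (4:Int) < 5 by norm_num),
        PySem.List.slice_natCast_add,
        pv_mem_drop_take s hnd x r hr hsr (3*f) f]
    by_cases hf : f = 0
    · subst hf
      rw [if_pos (Or.inl (by norm_num))]
      constructor
      · intro h; omega
      · intro h; norm_num at h
    · by_cases hc : 4*f ≤ r
      · rw [if_pos (Or.inr (by omega))]
        constructor
        · intro h; omega
        · intro h; norm_num at h
      · rw [if_neg (by omega), hfd]
        constructor
        · intro h
          have hq : r / f = 3 := (pv_div_eq r f 3 (by omega)).mpr (by omega)
          rw [hq]; norm_num
        · intro h
          have hq : r / f = 3 := by exact_mod_cast (show ((r/f : Nat) : Int) = 3 by omega)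
          have := (pv_div_eq r f 3 (by omega)).mp hq
          omega
  · -- n = 5
    rw [if_neg (show ¬ (5:Int) < 5 by norm_num),
        show ((5:Int) - 1) * (f:Int) = ((4*f : Nat) : Int) by push_cast; ring,
        PySem.List.slice_natCast,
        List.take_of_length_le (by simp),
        pv_mem_drop s hnd x r hr hsr (4*f)]
    by_cases hf : f = 0
    · subst hf
      rw [if_pos (Or.inl (by norm_num))]
      simp
    · by_cases hc : 4*f ≤ r
      · rw [if_pos (Or.inr (by omega))]
        simp [hc]
      · rw [if_neg (by omega), hfd]
        constructor
        · intro h; omega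
        · intro h
          have hq : r / f = 4 := by exact_mod_cast (show ((r/f : Nat) : Int) = 4 by omega)
          have := (pv_div_eq r f 4 (by omega)).mp hq
          omega

theorem pv_core (image_list : List String) (n : Int) (h1 : 1 ≤ n) (h5 : n ≤ 5) :
    select_nth_fifth_images_for_validation image_list n
      = select_nth_fifth_images_for_validation_alt image_list n := by
  unfold select_nth_fifth_images_for_validation select_nth_fifth_images_for_validation_alt
  simp only []
  generalize hpre : PySem.Set.ofList (image_list.map pvPrefix) = pre
  generalize hs : PySem.List.sorted pre (fun x => x) false = s
  have hperm : s.Perm pre := by rw [← hs]; exact PySem.List.sorted_perm _ _ _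
  have hp : s.Pairwise (· < ·) := by
    rw [← hs, ← hpre]; exact PySem.List.sorted_ofList_pairwise_lt _
  have hnd : s.Nodup := hp.imp (fun h => ne_of_lt h)
  have hlen : pre.length = s.length := hperm.length_eq.symm
  have hmem : ∀ im ∈ image_list, pvPrefix im ∈ s := by
    intro im him
    rw [hperm.mem_iff, ← hpre, PySem.Set.mem_ofList]
    exact List.mem_map_of_mem him
  rw [hlen]
  rw [show PySem.Int.floordiv (s.length : Int) 5 = ((s.length / 5 : Nat) : Int) from by
    exact_mod_cast PySem.Int.floordiv_natCast s.length 5]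
  rw [pv_foldl_route]
  simp only [List.nil_append]
  have hbkt : ∀ im ∈ image_list,
      (pvBucket pre ((s.length / 5 : Nat) : Int) (pvPrefix im) = n)
        ↔ pvPrefix im ∈ PySem.Set.ofList (PySem.List.slice s
            (some ((n - 1) * ((s.length / 5 : Nat) : Int)))
            (some (if n < 5 then (n - 1) * ((s.length / 5 : Nat) : Int) + ((s.length / 5 : Nat) : Int)
                   else (s.length : Int)))) := by
    intro im him
    unfold pvBucket
    simp only []
    rw [← hperm.countP_eq]
    exact (pv_sel s hp (s.length / 5) n h1 h5 (pvPrefix im) (hmem im him)).symm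
  refine congrArg₂ Prod.mk ?_ ?_
  · apply List.filter_congr
    intro im him
    rw [PySem.Set.contains_eq_listContains, List.contains_eq_mem, decide_eq_decide]
    exact (hbkt im him).symm
  · apply List.filter_congr
    intro im him
    rw [PySem.Set.contains_eq_listContains, List.contains_eq_mem, ← decide_not, decide_eq_decide]
    rw [pv_key s hnd (s.length / 5) n h1 h5 (pvPrefix im) (hmem im him)]
    rw [hbkt im him]

-- ===== VERDICT (by name: the statement is the Claim_ definition above) =====
theorem select_nth_fifth_images_for_validation_spec : Claim_equal_select_nth_fifth_images_for_validation := by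
  intro image_list n _hdom hpre
  unfold Spec_select_nth_fifth_images_for_validation
  exact pv_core image_list n hpre.1 hpre.2
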